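-- pv_equiv track=rewrite | github.com/Explomind/GB-Python | Task5_5.py | long_list
-- ===== SOURCE A (Python) =====
-- def long_list(int_list):
--     result_list = []
--     for i in range(len(int_list)):
--         for j in range(i + 1, len(int_list)):
--             tmp_list = [int_list[i]]
--             tmp = int_list[i]
--             for k in range(j, len(int_list)):
--                 if int_list[k] > tmp:
--                     tmp = int_list[k]
--                     tmp_list.append(tmp)
--             if len(tmp_list) > len(result_list):
--                 result_list = tmp_list
--     return result_list
-- ===== SOURCE B (Python) =====
-- def long_list(int_list):
--     # O(n^2): precompute, for each position p, the length r[p] of the greedy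
--     # record chain after p with threshold int_list[p], plus the next-record
--     # pointer ng[p]; then each (i, j) candidate length is O(1) and the best
--     # candidate list is reconstructed once at the end by following ng.
--     n = len(int_list)
--     ng = [n] * n
--     r = [0] * n
--     for p in range(n - 1, -1, -1):
--         q = p + 1
--         while q < n and int_list[q] <= int_list[p]:
--             q += 1
--         ng[p] = q
--         r[p] = 0 if q == n else 1 + r[q]
--     best_len = 0
--     best_i = 0
--     best_p = n
--     for i in range(n):
--         v = int_list[i]
--         p = i + 1
--         while p < n and int_list[p] <= v:
--             p += 1
--         # invariant: p is the first index >= j with int_list[p] > v (or n)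
--         for j in range(i + 1, n):
--             l = 1 if p == n else 2 + r[p]
--             if l > best_len:
--                 best_len, best_i, best_p = l, i, p
--             if p == j:
--                 p += 1
--                 while p < n and int_list[p] <= v:
--                     p += 1
--     if best_len == 0:
--         return []
--     out = [int_list[best_i]]
--     p = best_p
--     while p < n:
--         out.append(int_list[p])
--         p = ng[p]
--     return out
-- ===== Notes on version B (the rewrite author's own statement) =====
-- stated objective: faster
-- what changed: Instead of rebuilding each greedy record run with an inner O(n) scan per start pair (i,j), B precomputes next-record pointers and suffix record-chain lengths in one right-to-left pass, evaluates each (i,j) candidate length in O(1) while sliding the first-exceeding-position pointer, and reconstructs only the single best list at the end.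
import Mathlib
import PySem

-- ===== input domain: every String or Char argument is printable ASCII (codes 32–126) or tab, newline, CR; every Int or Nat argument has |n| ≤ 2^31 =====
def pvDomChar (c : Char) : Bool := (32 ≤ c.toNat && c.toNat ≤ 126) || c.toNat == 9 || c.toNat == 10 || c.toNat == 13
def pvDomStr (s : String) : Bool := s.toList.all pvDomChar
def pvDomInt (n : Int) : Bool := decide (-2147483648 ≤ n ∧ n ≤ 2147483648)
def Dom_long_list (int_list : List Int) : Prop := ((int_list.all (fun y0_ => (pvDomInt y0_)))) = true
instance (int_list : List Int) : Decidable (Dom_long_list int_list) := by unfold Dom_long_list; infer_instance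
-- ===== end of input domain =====

-- B replaces A's per-pair O(n) record-run rebuild with precomputed next-record pointers
-- and chain lengths (one O(1) length per pair, one final reconstruction): measurably faster.


-- ===== PORT A =====
def long_list (int_list : List Int) : List Int :=
  (PySem.List.pyRange 0 (PySem.List.len int_list) 1).foldl (fun result_list i =>
    (PySem.List.pyRange (i + 1) (PySem.List.len int_list) 1).foldl (fun result_list j =>
      let st := (PySem.List.pyRange j (PySem.List.len int_list) 1).foldl
        (fun (st : List Int × Int) k =>
          if PySem.List.pyGetD int_list k 0 > st.2 then
            (st.1 ++ [PySem.List.pyGetD int_list k 0], PySem.List.pyGetD int_list k 0)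
          else st)
        ([PySem.List.pyGetD int_list i 0], PySem.List.pyGetD int_list i 0)
      if st.1.length > result_list.length then st.1 else result_list)
      result_list)
    []

-- ===== PORT B =====
-- the 'while q < n and int_list[q] <= v: q += 1' scans of Source B (returns the final q)
def pvFindUp (xs : List Int) (v : Int) (q : Nat) : Nat :=
  if q < xs.length then
    if xs.getD q 0 ≤ v then pvFindUp xs v (q + 1) else q
  else q
termination_by xs.length - q

-- Source B's backward table loop (p from n-1 down to 0) as recursion on the suffix:
-- returns (ng, r) for indices p..n-1
def pvTables (xs : List Int) (p : Nat) : List Nat × List Nat :=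
  if p < xs.length then
    let t := pvTables xs (p + 1)
    let q := pvFindUp xs (xs.getD p 0) (p + 1)
    let rp := if q = xs.length then 0 else 1 + t.2.getD (q - (p + 1)) 0
    (q :: t.1, rp :: t.2)
  else ([], [])
termination_by xs.length - p

-- Source B's final reconstruction 'while p < n: out.append(int_list[p]); p = ng[p]'.
-- fuel makes it structural; fuel = n suffices since ng[p] > p (proved below).
def pvWalk (xs : List Int) (ng : List Nat) (fuel : Nat) (p : Nat) : List Int :=
  match fuel with
  | 0 => []
  | fuel + 1 =>
    if p < xs.length then xs.getD p 0 :: pvWalk xs ng fuel (ng.getD p xs.length) else []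

def long_list_alt (int_list : List Int) : List Int :=
  let n := int_list.length
  let t := pvTables int_list 0
  let res := (List.range n).foldl (fun (st : Nat × Nat × Nat) i =>
      -- st = (best_len, best_i, best_p)
      let v := int_list.getD i 0
      ((List.range' (i + 1) (n - (i + 1))).foldl
        (fun (q : Nat × Nat × Nat × Nat) j =>
          -- q = (p, best_len, best_i, best_p)
          let l := if q.1 = n then 1 else 2 + t.2.getD q.1 0
          let b := if l > q.2.1 then (l, i, q.1) else q.2
          (if q.1 = j then pvFindUp int_list v (j + 1) else q.1, b))
        (pvFindUp int_list v (i + 1), st)).2)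
    (0, 0, n)
  if res.1 = 0 then []
  else int_list.getD res.2.1 0 :: pvWalk int_list t.1 n res.2.2

-- ===== PRECONDITION & SPEC =====
def Spec_long_list (int_list : List Int) (out : List Int) : Prop := out = long_list_alt int_list
instance (int_list : List Int) (out : List Int) : Decidable (Spec_long_list int_list out) := by unfold Spec_long_list; infer_instance

-- ===== CLAIM (what is proved, stated in full; the proofs are below) =====
def Claim_equal_long_list : Prop := ∀ (int_list : List Int), Dom_long_list int_list → Spec_long_list int_list (long_list int_list)

-- ===== LEMMAS AND PROOFS =====

-- greedy record run: elements strictly exceeding the running maximum, threshold t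
def pvRecords : List Int → Int → List Int
  | [], _ => []
  | x :: l, t => if x > t then x :: pvRecords l x else pvRecords l t

-- the record run that starts at position p (empty for p = length)
def pvRecFrom (xs : List Int) (p : Nat) : List Int :=
  if p = xs.length then [] else xs.getD p 0 :: pvRecords (xs.drop (p + 1)) (xs.getD p 0)

-- A's candidate for (i, j) with p = first position ≥ j whose value exceeds xs[i]
def pvCand (xs : List Int) (i p : Nat) : List Int := xs.getD i 0 :: pvRecFrom xs p

lemma pvFindUp_ge (xs : List Int) (v : Int) (q : Nat) : q ≤ pvFindUp xs v q := by
  fun_induction pvFindUp xs v q with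
  | case1 q h1 h2 ih => omega
  | case2 q h1 h2 => omega
  | case3 q h => omega

lemma pvFindUp_le (xs : List Int) (v : Int) (q : Nat) (h : q ≤ xs.length) :
    pvFindUp xs v q ≤ xs.length := by
  fun_induction pvFindUp xs v q with
  | case1 q h1 h2 ih => exact ih (by omega)
  | case2 q h1 h2 => omega
  | case3 q h1 => omega

-- findUp step: the pointer is unchanged when it already passed j
lemma pvFindUp_step (xs : List Int) (v : Int) (j : Nat) (hj : j < xs.length)
    (hne : pvFindUp xs v j ≠ j) : pvFindUp xs v j = pvFindUp xs v (j + 1) := by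
  rw [pvFindUp] at hne ⊢
  simp only [hj, if_true] at hne ⊢
  split at hne
  · split
    · rfl
    · omega
  · omega

-- the record run of the suffix from q is the run starting at the first position with value > v
lemma pvRecords_eq_recFrom (xs : List Int) (v : Int) (q : Nat) (h : q ≤ xs.length) :
    pvRecords (xs.drop q) v = pvRecFrom xs (pvFindUp xs v q) := by
  fun_induction pvFindUp xs v q with
  | case1 q h1 h2 ih =>
    rw [List.drop_eq_getElem_cons h1, pvRecords]
    rw [List.getD_eq_getElem xs 0 h1] at h2
    simp only [if_neg (by omega : ¬ xs[q] > v)]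
    exact ih (by omega)
  | case2 q h1 h2 =>
    rw [List.drop_eq_getElem_cons h1, pvRecords, pvRecFrom]
    rw [List.getD_eq_getElem xs 0 h1] at h2 ⊢
    simp only [if_neg (by omega : ¬ q = xs.length), if_pos (by omega : xs[q] > v)]
  | case3 q h1 =>
    have hq : q = xs.length := by omega
    rw [pvRecFrom, if_pos hq, hq, List.drop_length, pvRecords]

def pvTabOK (xs : List Int) (p : Nat) : Prop :=
  (pvTables xs p).1.length = xs.length - p ∧
  (pvTables xs p).2.length = xs.length - p ∧
  ∀ k, p ≤ k → k < xs.length →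
    (pvTables xs p).1.getD (k - p) 0 = pvFindUp xs (xs.getD k 0) (k + 1) ∧
    (pvTables xs p).2.getD (k - p) 0 = (pvRecords (xs.drop (k + 1)) (xs.getD k 0)).length

lemma pvTabOK_of_ge (xs : List Int) (p : Nat) (hp : ¬ p < xs.length) : pvTabOK xs p := by
  unfold pvTabOK
  rw [pvTables, if_neg hp]
  exact ⟨by simp only [List.length_nil]; omega, by simp only [List.length_nil]; omega,
    fun k hk1 hk2 => by omega⟩

lemma pvTables_spec (xs : List Int) (p : Nat) : pvTabOK xs p := by
  suffices h : ∀ m p, xs.length - p ≤ m → pvTabOK xs p from h (xs.length - p) p le_rfl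
  intro m
  induction m with
  | zero =>
    intro p hm
    exact pvTabOK_of_ge xs p (by omega)
  | succ m ih =>
    intro p hm
    by_cases hp : p < xs.length
    · obtain ⟨ih1, ih2, ih3⟩ := ih (p + 1) (by omega)
      unfold pvTabOK
      rw [pvTables, if_pos hp]
      simp only []
      refine ⟨by simp only [List.length_cons, ih1]; omega,
              by simp only [List.length_cons, ih2]; omega, ?_⟩
      intro k hk1 hk2
      rcases Nat.eq_or_lt_of_le hk1 with heq | hlt
      · subst heq
        simp only [Nat.sub_self, List.getD_cons_zero]
        refine ⟨by trivial, ?_⟩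
        rw [pvRecords_eq_recFrom xs (xs.getD p 0) (p + 1) (by omega)]
        set q := pvFindUp xs (xs.getD p 0) (p + 1) with hqdef
        by_cases hq : q = xs.length
        · rw [if_pos hq, pvRecFrom, if_pos hq]; rfl
        · rw [if_neg hq, pvRecFrom, if_neg hq]
          have hge : p + 1 ≤ q := pvFindUp_ge xs (xs.getD p 0) (p + 1)
          have hle : q ≤ xs.length := pvFindUp_le xs (xs.getD p 0) (p + 1) (by omega)
          have h2 := (ih3 q hge (by omega)).2
          rw [List.length_cons, h2]
          omega
      · have hk : k - p = (k - (p + 1)) + 1 := by omega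
        rw [hk]
        simp only [List.getD_cons_succ]
        exact ih3 k (by omega) hk2
    · exact pvTabOK_of_ge xs p hp

lemma pvWalk_eq_recFrom (xs : List Int) (fuel p : Nat) (hp : p ≤ xs.length)
    (hf : xs.length - p ≤ fuel) :
    pvWalk xs (pvTables xs 0).1 fuel p = pvRecFrom xs p := by
  induction fuel generalizing p with
  | zero =>
    have : p = xs.length := by omega
    rw [pvWalk, pvRecFrom, if_pos this]
  | succ fuel ih =>
    by_cases hp' : p < xs.length
    · rw [pvWalk]
      simp only [if_pos hp']
      obtain ⟨h1, _, h3⟩ := pvTables_spec xs 0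
      have hng : (pvTables xs 0).1.getD p xs.length = pvFindUp xs (xs.getD p 0) (p + 1) := by
        rw [List.getD_eq_getElem _ _ (by omega : p < (pvTables xs 0).1.length),
            ← List.getD_eq_getElem _ 0 (by omega : p < (pvTables xs 0).1.length)]
        have := (h3 p (by omega) hp').1
        simpa using this
      rw [hng]
      have hge : p + 1 ≤ pvFindUp xs (xs.getD p 0) (p + 1) := pvFindUp_ge xs _ _
      have hle : pvFindUp xs (xs.getD p 0) (p + 1) ≤ xs.length := pvFindUp_le xs _ _ (by omega)
      rw [pvRecFrom, if_neg (by omega : ¬ p = xs.length)]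
      rw [pvRecords_eq_recFrom xs (xs.getD p 0) (p + 1) (by omega)]
      rw [ih _ hle (by omega)]
    · have : p = xs.length := by omega
      rw [pvWalk]
      simp only [if_neg hp']
      rw [pvRecFrom, if_pos this]

-- A's inner k-loop computes the record run
lemma pvInnerA (xs : List Int) (j : Nat) (acc : List Int) (t : Int) :
    ((PySem.List.pyRange (j : Int) ((xs.length : Int)) 1).foldl
      (fun (st : List Int × Int) k =>
        if PySem.List.pyGetD xs k 0 > st.2 then
          (st.1 ++ [PySem.List.pyGetD xs k 0], PySem.List.pyGetD xs k 0)
        else st) (acc, t)).1 = acc ++ pvRecords (xs.drop j) t := by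
  suffices h : ∀ m j (acc : List Int) t, xs.length - j ≤ m →
      ((PySem.List.pyRange (j : Int) ((xs.length : Int)) 1).foldl
        (fun (st : List Int × Int) k =>
          if PySem.List.pyGetD xs k 0 > st.2 then
            (st.1 ++ [PySem.List.pyGetD xs k 0], PySem.List.pyGetD xs k 0)
          else st) (acc, t)).1 = acc ++ pvRecords (xs.drop j) t from
    h (xs.length - j) j acc t le_rfl
  intro m
  induction m with
  | zero =>
    intro j acc t hm
    rw [PySem.List.pyRange_one_eq_nil (by exact_mod_cast (by omega : xs.length ≤ j))]
    rw [List.drop_eq_nil_of_le (by omega), pvRecords]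
    simp
  | succ m ih =>
    intro j acc t hm
    by_cases hj : j < xs.length
    · rw [PySem.List.pyRange_one_cons (by exact_mod_cast hj)]
      simp only [List.foldl_cons, PySem.List.pyGetD_natCast]
      rw [List.drop_eq_getElem_cons hj, pvRecords]
      rw [List.getD_eq_getElem xs 0 hj]
      have hcast : (j : Int) + 1 = ((j + 1 : Nat) : Int) := by push_cast; ring
      by_cases hgt : xs[j] > t
      · rw [if_pos hgt, if_pos hgt, hcast, ih (j + 1) (acc ++ [xs[j]]) xs[j] (by omega)]
        simp
      · rw [if_neg hgt, if_neg hgt, hcast, ih (j + 1) acc t (by omega)]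
    · rw [PySem.List.pyRange_one_eq_nil (by exact_mod_cast (by omega : xs.length ≤ j))]
      rw [List.drop_eq_nil_of_le (by omega), pvRecords]
      simp

-- the step function of A's j-loop, expressed through the first-exceeding position
def pvFA (xs : List Int) (i : Nat) (g : List Int) (j : Nat) : List Int :=
  if (pvCand xs i (pvFindUp xs (xs.getD i 0) j)).length > g.length then
    pvCand xs i (pvFindUp xs (xs.getD i 0) j)
  else g

-- the invariant tying A's current best list to B's (best_len, best_i, best_p)
def pvInv (xs : List Int) (g : List Int) (st : Nat × Nat × Nat) : Prop :=
  (st.1 = 0 ∧ g = []) ∨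
  (0 < st.1 ∧ st.2.2 ≤ xs.length ∧ g = pvCand xs st.2.1 st.2.2 ∧ g.length = st.1)

-- B's O(1) length formula equals the candidate's true length
lemma pvLen_eq (xs : List Int) (i p : Nat) (hp : p ≤ xs.length) :
    (if p = xs.length then 1 else 2 + (pvTables xs 0).2.getD p 0) = (pvCand xs i p).length := by
  by_cases hq : p = xs.length
  · rw [if_pos hq]; unfold pvCand pvRecFrom; rw [if_pos hq]; rfl
  · rw [if_neg hq]; unfold pvCand pvRecFrom; rw [if_neg hq]
    have h := ((pvTables_spec xs 0).2.2 p (by omega) (by omega)).2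
    have hp0 : p - 0 = p := by omega
    rw [hp0] at h
    rw [h]
    simp only [List.length_cons]
    omega

-- paired induction over the j-loop: A's best list and B's (p, best) stay related
lemma pvInner_pair (xs : List Int) (i : Nat) :
    ∀ (m c : Nat) (g : List Int) (st : Nat × Nat × Nat), i + 1 ≤ c → c + m = xs.length →
    pvInv xs g st →
    pvInv xs ((List.range' c m).foldl (pvFA xs i) g)
      (((List.range' c m).foldl
        (fun (q : Nat × Nat × Nat × Nat) j =>
          (if q.1 = j then pvFindUp xs (xs.getD i 0) (j + 1) else q.1,
            if (if q.1 = xs.length then 1 else 2 + (pvTables xs 0).2.getD q.1 0) > q.2.1 then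
              ((if q.1 = xs.length then 1 else 2 + (pvTables xs 0).2.getD q.1 0), i, q.1)
            else q.2))
        (pvFindUp xs (xs.getD i 0) c, st)).2) := by
  intro m
  induction m with
  | zero =>
    intro c g st h1 h2 h3
    simpa using h3
  | succ m ih =>
    intro c g st h1 h2 h3
    have hc : c < xs.length := by omega
    rw [List.range'_succ]
    simp only [List.foldl_cons]
    try dsimp only
    have hp0le : pvFindUp xs (xs.getD i 0) c ≤ xs.length := pvFindUp_le _ _ _ (by omega)
    have hpstep : (if pvFindUp xs (xs.getD i 0) c = c then pvFindUp xs (xs.getD i 0) (c + 1)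
        else pvFindUp xs (xs.getD i 0) c) = pvFindUp xs (xs.getD i 0) (c + 1) := by
      by_cases h : pvFindUp xs (xs.getD i 0) c = c
      · rw [if_pos h]
      · rw [if_neg h]
        exact pvFindUp_step xs (xs.getD i 0) c hc h
    have hlen : g.length = st.1 := by
      rcases h3 with ⟨h0, hg⟩ | ⟨_, _, hg, hl⟩
      · rw [hg, h0]; rfl
      · exact hl
    rw [hpstep, pvLen_eq xs i (pvFindUp xs (xs.getD i 0) c) hp0le]
    refine ih (c + 1) _ _ (by omega) (by omega) ?_
    by_cases hcond : (pvCand xs i (pvFindUp xs (xs.getD i 0) c)).length > st.1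
    · rw [if_pos hcond]
      unfold pvFA
      rw [if_pos (by omega : (pvCand xs i (pvFindUp xs (xs.getD i 0) c)).length > g.length)]
      exact Or.inr ⟨by unfold pvCand; simp, hp0le, rfl, rfl⟩
    · rw [if_neg hcond]
      unfold pvFA
      rw [if_neg (by omega : ¬ (pvCand xs i (pvFindUp xs (xs.getD i 0) c)).length > g.length)]
      exact h3

-- paired induction over the i-loop
lemma pvOuter_pair (xs : List Int) :
    ∀ (m c : Nat) (g : List Int) (st : Nat × Nat × Nat), c + m = xs.length →
    pvInv xs g st →
    pvInv xs
      ((List.range' c m).foldl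
        (fun g i => (List.range' (i + 1) (xs.length - (i + 1))).foldl (pvFA xs i) g) g)
      ((List.range' c m).foldl
        (fun (st : Nat × Nat × Nat) i =>
          ((List.range' (i + 1) (xs.length - (i + 1))).foldl
            (fun (q : Nat × Nat × Nat × Nat) j =>
              (if q.1 = j then pvFindUp xs (xs.getD i 0) (j + 1) else q.1,
                if (if q.1 = xs.length then 1 else 2 + (pvTables xs 0).2.getD q.1 0) > q.2.1 then
                  ((if q.1 = xs.length then 1 else 2 + (pvTables xs 0).2.getD q.1 0), i, q.1)
                else q.2))
            (pvFindUp xs (xs.getD i 0) (i + 1), st)).2) st) := by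
  intro m
  induction m with
  | zero =>
    intro c g st h1 h2
    simpa using h2
  | succ m ih =>
    intro c g st h1 h2
    have hc : c < xs.length := by omega
    rw [List.range'_succ]
    simp only [List.foldl_cons]
    exact ih (c + 1) _ _ (by omega)
      (pvInner_pair xs c (xs.length - (c + 1)) (c + 1) g st (by omega) (by omega) h2)

-- A's j-loop, rewritten through pvFA
lemma pvA_inner_conv (xs : List Int) (i : Nat) :
    ∀ (m c : Nat) (g : List Int), i + 1 ≤ c → c + m = xs.length →
    (PySem.List.pyRange (c : Int) ((xs.length : Int)) 1).foldl
      (fun result_list j =>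
        let st := (PySem.List.pyRange j ((xs.length : Int)) 1).foldl
          (fun (st : List Int × Int) k =>
            if PySem.List.pyGetD xs k 0 > st.2 then
              (st.1 ++ [PySem.List.pyGetD xs k 0], PySem.List.pyGetD xs k 0)
            else st)
          ([PySem.List.pyGetD xs (i : Int) 0], PySem.List.pyGetD xs (i : Int) 0)
        if st.1.length > result_list.length then st.1 else result_list) g
    = (List.range' c m).foldl (pvFA xs i) g := by
  intro m
  induction m with
  | zero =>
    intro c g h1 h2
    rw [PySem.List.pyRange_one_eq_nil (by exact_mod_cast (by omega : xs.length ≤ c))]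
    rfl
  | succ m ih =>
    intro c g h1 h2
    have hc : c < xs.length := by omega
    rw [PySem.List.pyRange_one_cons (by exact_mod_cast hc), List.range'_succ]
    simp only [List.foldl_cons]
    try dsimp only
    rw [pvInnerA xs c]
    have hcast : (c : Int) + 1 = ((c + 1 : Nat) : Int) := by push_cast; ring
    rw [hcast, ih (c + 1) _ (by omega) (by omega)]
    congr 1
    rw [pvRecords_eq_recFrom xs _ c (by omega)]
    simp only [PySem.List.pyGetD_natCast]
    show (if ([xs.getD i 0] ++ pvRecFrom xs (pvFindUp xs (xs.getD i 0) c)).length > g.length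
      then [xs.getD i 0] ++ pvRecFrom xs (pvFindUp xs (xs.getD i 0) c) else g) = pvFA xs i g c
    unfold pvFA pvCand
    simp only [List.singleton_append]

-- A's whole loop nest, rewritten through pvFA
lemma pvA_eq (xs : List Int) :
    long_list xs = (List.range' 0 xs.length).foldl
      (fun g i => (List.range' (i + 1) (xs.length - (i + 1))).foldl (pvFA xs i) g) [] := by
  unfold long_list
  rw [PySem.List.len_eq, PySem.List.pyRange_zero_nat, List.foldl_map, List.range_eq_range']
  apply PySem.List.foldl_congr_mem
  intro acc k hk
  have hk' : k < xs.length := by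
    have := List.mem_range'.mp hk
    omega
  have hcast : (k : Int) + 1 = ((k + 1 : Nat) : Int) := by push_cast; ring
  rw [hcast]
  exact pvA_inner_conv xs k (xs.length - (k + 1)) (k + 1) acc (by omega) (by omega)

theorem long_list_spec : Claim_equal_long_list := by
  intro xs _
  unfold Spec_long_list
  rw [pvA_eq]
  unfold long_list_alt
  try dsimp only
  rw [List.range_eq_range']
  have hInv := pvOuter_pair xs xs.length 0 [] (0, 0, xs.length) (by omega) (Or.inl ⟨rfl, rfl⟩)
  set R := (List.range' 0 xs.length).foldl
        (fun (st : Nat × Nat × Nat) i =>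
          ((List.range' (i + 1) (xs.length - (i + 1))).foldl
            (fun (q : Nat × Nat × Nat × Nat) j =>
              (if q.1 = j then pvFindUp xs (xs.getD i 0) (j + 1) else q.1,
                if (if q.1 = xs.length then 1 else 2 + (pvTables xs 0).2.getD q.1 0) > q.2.1 then
                  ((if q.1 = xs.length then 1 else 2 + (pvTables xs 0).2.getD q.1 0), i, q.1)
                else q.2))
            (pvFindUp xs (xs.getD i 0) (i + 1), st)).2) (0, 0, xs.length) with hR
  rcases hInv with ⟨h1, h2⟩ | ⟨hpos, hle, hg, hlen⟩
  · rw [h2, if_pos h1]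
  · rw [if_neg (by omega : ¬ R.1 = 0)]
    rw [pvWalk_eq_recFrom xs xs.length R.2.2 hle (by omega)]
    exact hg
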